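-- pv_equiv track=rewrite | github.com/Clement32112/PyTokeinizer | CFG.py | valueToProdArray
-- ===== SOURCE A (Python) =====
-- def valueToProdArray(value):
--     prod_array =[]
--     i = 0
--     while i < len(value):  #loops through all charaters in production value
--
--         if i+1 >= len(value): # Stop converting if at end
--             prod_array.append(value[i])
--             return prod_array
--
--         if value[i+1] == '`':
--             prod_array.append(value[i:i+2]) # add Termial with backtick(`)
--             i+= 1
--         elif value[i:i+2] == "id":
--              prod_array.append(value[i:i+2]) # add id
--              i+= 1
--         else:
--             prod_array.append(value[i])
--         i+= 1
--     return prod_array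
-- ===== SOURCE B (Python) =====
-- def valueToProdArray(value):
--     # One-pass streaming tokenizer: keeps a single pending character instead of
--     # indexing with lookahead and slicing.
--     prod_array = []
--     pending = None
--     for c in value:
--         if pending is None:
--             pending = c
--         elif c == '`':
--             prod_array.append(pending + '`')
--             pending = None
--         elif pending == 'i' and c == 'd':
--             prod_array.append('id')
--             pending = None
--         else:
--             prod_array.append(pending)
--             pending = c
--     if pending is not None:
--         prod_array.append(pending)
--     return prod_array
-- ===== Notes on version B (the rewrite author's own statement) =====
-- stated objective: faster
-- what changed: Replaced A's index-based while loop with two-character lookahead (value[i+1], slicing value[i:i+2], early return at the last index) by a single streaming for-loop over the characters that carries one pending character as state and emits tokens when a pair is resolved; no per-step slicing or index arithmetic.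
import Mathlib
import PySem

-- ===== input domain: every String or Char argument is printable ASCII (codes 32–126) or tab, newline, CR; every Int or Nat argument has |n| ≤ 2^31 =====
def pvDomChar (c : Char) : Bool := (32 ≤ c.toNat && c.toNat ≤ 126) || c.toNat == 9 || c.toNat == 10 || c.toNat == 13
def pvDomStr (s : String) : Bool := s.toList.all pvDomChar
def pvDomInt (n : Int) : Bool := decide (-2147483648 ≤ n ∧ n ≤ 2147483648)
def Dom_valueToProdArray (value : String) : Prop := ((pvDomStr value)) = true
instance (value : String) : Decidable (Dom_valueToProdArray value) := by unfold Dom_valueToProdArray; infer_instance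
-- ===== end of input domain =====

-- B replaces A's indexed while-loop with lookahead/slicing by a one-pass fold carrying a
-- single pending character (objective: simpler/alternative; return value only).

-- ===== PORT A =====
-- A's while loop over index i; fuel = length - i. value[i] / value[i+1] are in range at
-- every use (guarded by the surrounding ifs), so getD is exact; value[i:i+2] with
-- 0 ≤ i is exactly (drop i).take 2.
def goA (chars : List Char) (i : Nat) (acc : List String) : List String :=
  if i < chars.length then
    if i + 1 ≥ chars.length then
      acc ++ [String.mk [chars.getD i ' ']]
    else if chars.getD (i+1) ' ' = '`' then
      goA chars (i+2) (acc ++ [String.mk ((chars.drop i).take 2)])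
    else if (chars.drop i).take 2 = ['i', 'd'] then
      goA chars (i+2) (acc ++ [String.mk ((chars.drop i).take 2)])
    else
      goA chars (i+1) (acc ++ [String.mk [chars.getD i ' ']])
  else acc
termination_by chars.length - i

def valueToProdArray (value : String) : List String :=
  goA value.toList 0 []

-- ===== PORT B =====
-- state = (output so far, pending character or none); one fold over the characters.
def stepB (st : List String × Option Char) (c : Char) : List String × Option Char :=
  match st.2 with
  | none => (st.1, some c)
  | some p =>
    if c = '`' then (st.1 ++ [String.mk [p, '`']], none)
    else if p = 'i' ∧ c = 'd' then (st.1 ++ ["id"], none)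
    else (st.1 ++ [String.mk [p]], some c)

def valueToProdArray_alt (value : String) : List String :=
  let st := value.toList.foldl stepB ([], none)
  match st.2 with
  | none => st.1
  | some p => st.1 ++ [String.mk [p]]

-- ===== PRECONDITION & SPEC =====
def Spec_valueToProdArray (value : String) (out : List String) : Prop := out = valueToProdArray_alt value
instance (value : String) (out : List String) : Decidable (Spec_valueToProdArray value out) := by unfold Spec_valueToProdArray; infer_instance

-- ===== CLAIM (what is proved, stated in full; the proofs are below) =====
def Claim_equal_valueToProdArray : Prop := ∀ (value : String), Dom_valueToProdArray value → Spec_valueToProdArray value (valueToProdArray value)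

-- ===== LEMMAS AND PROOFS =====

-- reference tokenization, structural on the character list
def tok : List Char → List String
  | [] => []
  | [a] => [String.mk [a]]
  | a :: b :: r =>
    if b = '`' then String.mk [a, b] :: tok r
    else if a = 'i' ∧ b = 'd' then "id" :: tok r
    else String.mk [a] :: tok (b :: r)

-- B's fold computes tok
theorem foldB_tok (cs : List Char) :
    (∀ (acc : List String) (p : Char),
      (match (cs.foldl stepB (acc, some p)).2 with
       | none => (cs.foldl stepB (acc, some p)).1
       | some q => (cs.foldl stepB (acc, some p)).1 ++ [String.mk [q]]) = acc ++ tok (p :: cs)) ∧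
    (∀ (acc : List String),
      (match (cs.foldl stepB (acc, none)).2 with
       | none => (cs.foldl stepB (acc, none)).1
       | some q => (cs.foldl stepB (acc, none)).1 ++ [String.mk [q]]) = acc ++ tok cs) := by
  induction cs with
  | nil => exact ⟨fun acc p => by simp [tok], fun acc => by simp [tok]⟩
  | cons c r ih =>
    refine ⟨fun acc p => ?_, fun acc => ?_⟩
    · simp only [List.foldl_cons, stepB]
      by_cases h1 : c = '`'
      · subst h1
        simp only [reduceIte]
        rw [ih.2]
        simp [tok]
      · rw [if_neg h1]
        by_cases h2 : p = 'i' ∧ c = 'd'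
        · rw [if_pos h2]
          rw [ih.2]
          obtain ⟨hp, hc⟩ := h2; subst hp; subst hc
          simp [tok, h1]
        · rw [if_neg h2]
          rw [ih.1]
          simp only [tok, if_neg h1, if_neg h2, List.append_assoc, List.singleton_append]
    · simp only [List.foldl_cons, stepB]
      exact ih.1 acc c

-- A's loop computes tok of the remaining suffix
theorem goA_tok (n : Nat) : ∀ (chars : List Char) (i : Nat), chars.length - i = n →
    ∀ acc, goA chars i acc = acc ++ tok (chars.drop i) := by
  induction n using Nat.strong_induction_on with
  | _ n ih =>
    intro chars i hn acc
    rw [goA]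
    by_cases hi : i < chars.length
    · rw [if_pos hi]
      have hdrop : chars.drop i = chars[i] :: chars.drop (i+1) :=
        List.drop_eq_getElem_cons hi
      have hgetD : chars.getD i ' ' = chars[i] := List.getD_eq_getElem _ _ hi
      by_cases hend : i + 1 ≥ chars.length
      · rw [if_pos hend]
        have hnil : chars.drop (i+1) = [] := List.drop_eq_nil_of_le hend
        rw [hgetD, hdrop, hnil]
        simp [tok]
      · rw [if_neg hend]
        have hend' : i + 1 < chars.length := by omega
        have hdrop1 : chars.drop (i+1) = chars[i+1] :: chars.drop (i+2) :=
          List.drop_eq_getElem_cons hend'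
        have hgetD1 : chars.getD (i+1) ' ' = chars[i+1] := List.getD_eq_getElem _ _ hend'
        have htake : (chars.drop i).take 2 = [chars[i], chars[i+1]] := by
          rw [hdrop, hdrop1]; rfl
        by_cases hbt : chars.getD (i+1) ' ' = '`'
        · rw [if_pos hbt]
          rw [ih (chars.length - (i+2)) (by omega) chars (i+2) rfl]
          rw [hgetD1] at hbt
          rw [htake, hdrop, hdrop1]
          simp [tok, hbt]
        · rw [if_neg hbt]
          rw [hgetD1] at hbt
          by_cases hid : (chars.drop i).take 2 = ['i', 'd']
          · rw [if_pos hid]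
            rw [ih (chars.length - (i+2)) (by omega) chars (i+2) rfl]
            rw [htake] at hid
            obtain ⟨hii, hdd⟩ : chars[i] = 'i' ∧ chars[i+1] = 'd' := by
              simpa using hid
            rw [htake, hdrop, hdrop1]
            simp only [tok, hii, hdd, List.append_assoc, List.singleton_append]
            rfl
          · rw [if_neg hid]
            rw [ih (chars.length - (i+1)) (by omega) chars (i+1) rfl]
            rw [htake] at hid
            have hnid : ¬ (chars[i] = 'i' ∧ chars[i+1] = 'd') := by
              intro h; exact hid (by rw [h.1, h.2])
            rw [hgetD, hdrop, hdrop1]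
            simp [tok, hbt, hnid]
    · rw [if_neg hi]
      have hle : chars.length ≤ i := by omega
      rw [List.drop_eq_nil_of_le hle]
      simp [tok]

-- ===== VERDICT (by name: the statement is the Claim_ definition above) =====
theorem valueToProdArray_spec : Claim_equal_valueToProdArray := by
  intro value _
  unfold Spec_valueToProdArray valueToProdArray valueToProdArray_alt
  rw [goA_tok (value.toList.length - 0) value.toList 0 rfl []]
  rw [(foldB_tok value.toList).2 []]
  simp
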